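-- pv_equiv track=rewrite | github.com/EmersonNog/cognix_api | app/services/economy/catalog.py | normalize_owned_avatar_seeds
-- ===== SOURCE A (Python) =====
-- from collections.abc import Iterable
--
-- AVATAR_STORE_CATALOG: tuple[dict[str, object], ...] = (
--     {'seed': 'avatar_1', 'title': 'Avatar 1', 'cost_half_units': 0},
--     {'seed': 'avatar_2', 'title': 'Avatar 2', 'cost_half_units': 6},
--     {'seed': 'avatar_3', 'title': 'Avatar 3', 'cost_half_units': 10},
--     {'seed': 'avatar_4', 'title': 'Avatar 4', 'cost_half_units': 14},
--     {'seed': 'avatar_5', 'title': 'Avatar 5', 'cost_half_units': 18},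
--     {'seed': 'avatar_6', 'title': 'Avatar 6', 'cost_half_units': 22},
--     {'seed': 'avatar_7', 'title': 'Avatar 7', 'cost_half_units': 26},
--     {'seed': 'avatar_8', 'title': 'Avatar 8', 'cost_half_units': 30},
--     {'seed': 'avatar_9', 'title': 'Avatar 9', 'cost_half_units': 36},
--     {'seed': 'avatar_10', 'title': 'Avatar 10', 'cost_half_units': 44},
-- )
--
-- def normalize_owned_avatar_seeds(raw_items: Iterable[object]) -> list[str]:
--     unique = {
--         str(item).strip()
--         for item in raw_items
--         if str(item).strip()
--     }
--     return [
--         str(item['seed'])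
--         for item in AVATAR_STORE_CATALOG
--         if str(item['seed']) in unique
--     ]
-- ===== SOURCE B (Python) =====
-- AVATAR_STORE_CATALOG: tuple[dict[str, object], ...] = (
--     {'seed': 'avatar_1', 'title': 'Avatar 1', 'cost_half_units': 0},
--     {'seed': 'avatar_2', 'title': 'Avatar 2', 'cost_half_units': 6},
--     {'seed': 'avatar_3', 'title': 'Avatar 3', 'cost_half_units': 10},
--     {'seed': 'avatar_4', 'title': 'Avatar 4', 'cost_half_units': 14},
--     {'seed': 'avatar_5', 'title': 'Avatar 5', 'cost_half_units': 18},
--     {'seed': 'avatar_6', 'title': 'Avatar 6', 'cost_half_units': 22},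
--     {'seed': 'avatar_7', 'title': 'Avatar 7', 'cost_half_units': 26},
--     {'seed': 'avatar_8', 'title': 'Avatar 8', 'cost_half_units': 30},
--     {'seed': 'avatar_9', 'title': 'Avatar 9', 'cost_half_units': 36},
--     {'seed': 'avatar_10', 'title': 'Avatar 10', 'cost_half_units': 44},
-- )
--
-- _SEED_INDEX = {str(it['seed']): i for i, it in enumerate(AVATAR_STORE_CATALOG)}
--
-- def normalize_owned_avatar_seeds(raw_items):
--     owned = {s for s in (str(item).strip() for item in raw_items) if s}
--     hits = [s for s in owned if s in _SEED_INDEX]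
--     hits.sort(key=_SEED_INDEX.get)
--     return hits
-- ===== Notes on version B (the rewrite author's own statement) =====
-- stated objective: alternative
-- what changed: A scans the fixed catalog and tests each seed against the owned set; B builds a seed-to-position index once, collects the owned seeds that appear in the index, and sorts them by catalog position.
import Mathlib
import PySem

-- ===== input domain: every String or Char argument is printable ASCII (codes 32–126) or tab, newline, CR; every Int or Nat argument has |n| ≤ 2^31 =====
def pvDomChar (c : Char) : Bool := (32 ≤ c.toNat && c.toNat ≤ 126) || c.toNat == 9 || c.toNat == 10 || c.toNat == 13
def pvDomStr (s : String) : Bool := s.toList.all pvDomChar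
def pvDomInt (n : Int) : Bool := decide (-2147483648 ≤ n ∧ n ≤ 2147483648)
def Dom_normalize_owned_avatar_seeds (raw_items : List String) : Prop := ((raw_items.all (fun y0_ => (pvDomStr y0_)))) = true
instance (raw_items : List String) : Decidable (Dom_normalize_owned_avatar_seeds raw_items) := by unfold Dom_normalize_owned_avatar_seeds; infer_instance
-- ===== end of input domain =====

-- ===== PORT A =====
-- A: build the set of stripped non-empty strings, then scan the catalog and keep the seeds in that set.
-- B: build a seed -> catalog-position index, keep the owned seeds present in the index, sort by position.
-- Objective: alternative decomposition (iterate owned items + sort by table position instead of scanning the catalog).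
def pvCatalogSeeds : List String :=
  ["avatar_1", "avatar_2", "avatar_3", "avatar_4", "avatar_5",
   "avatar_6", "avatar_7", "avatar_8", "avatar_9", "avatar_10"]

def normalize_owned_avatar_seeds (raw_items : List String) : List String :=
  let unique : PySem.Set String :=
    PySem.Set.ofList ((raw_items.map (fun item => PySem.Str.strip item)).filter (fun s => s != ""))
  pvCatalogSeeds.filter (fun s => PySem.Set.contains unique s)

-- ===== PORT B =====
-- _SEED_INDEX = {seed: i for i, it in enumerate(AVATAR_STORE_CATALOG)}
def pvSeedIndex : PySem.Dict String Int :=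
  (PySem.List.enumerate pvCatalogSeeds).foldl (fun d p => d.insert p.2 p.1) PySem.Dict.empty

def normalize_owned_avatar_seeds_alt (raw_items : List String) : List String :=
  let owned : PySem.Set String :=
    PySem.Set.ofList ((raw_items.map (fun item => PySem.Str.strip item)).filter (fun s => s != ""))
  let hits : List String := owned.filter (fun s => pvSeedIndex.contains s)
  PySem.List.sorted hits (fun s => pvSeedIndex.getD s 0) false

-- ===== PRECONDITION & SPEC =====
def Spec_normalize_owned_avatar_seeds (raw_items : List String) (out : List String) : Prop := out = normalize_owned_avatar_seeds_alt raw_items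
instance (raw_items : List String) (out : List String) : Decidable (Spec_normalize_owned_avatar_seeds raw_items out) := by unfold Spec_normalize_owned_avatar_seeds; infer_instance

-- ===== CLAIM (what is proved, stated in full; the proofs are below) =====
def Claim_equal_normalize_owned_avatar_seeds : Prop := ∀ (raw_items : List String), Dom_normalize_owned_avatar_seeds raw_items → Spec_normalize_owned_avatar_seeds raw_items (normalize_owned_avatar_seeds raw_items)

-- ===== LEMMAS AND PROOFS =====
theorem pvIndex_mk : pvSeedIndex = PySem.Dict.mk
    [("avatar_1", (0 : Int)), ("avatar_2", 1), ("avatar_3", 2), ("avatar_4", 3), ("avatar_5", 4),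
     ("avatar_6", 5), ("avatar_7", 6), ("avatar_8", 7), ("avatar_9", 8), ("avatar_10", 9)] := by
  decide

theorem pvIndex_contains_iff (s : String) :
    pvSeedIndex.contains s = true ↔ s ∈ pvCatalogSeeds := by
  rw [pvIndex_mk]
  simp [pvCatalogSeeds]
  tauto

theorem pvCore (u : PySem.Set String) (hu : u.Nodup) :
    pvCatalogSeeds.filter (fun s => PySem.Set.contains u s)
      = PySem.List.sorted (List.filter (fun s => pvSeedIndex.contains s) u)
          (fun s => pvSeedIndex.getD s 0) false := by
  refine (PySem.List.sorted_eq_of_perm_of_pairwise_lt _ _ _ ?_ ?_).symm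
  · refine (List.perm_ext_iff_of_nodup (List.filter_sublist.nodup (by decide))
      (List.filter_sublist.nodup hu)).mpr ?_
    intro a
    simp only [List.mem_filter, PySem.Set.contains_iff, pvIndex_contains_iff]
    tauto
  · exact List.Pairwise.sublist (List.filter_sublist (l := pvCatalogSeeds)) (by decide)

-- ===== VERDICT (by name: the statement is the Claim_ definition above) =====
theorem normalize_owned_avatar_seeds_spec : Claim_equal_normalize_owned_avatar_seeds := by
  intro raw_items _
  show normalize_owned_avatar_seeds raw_items = normalize_owned_avatar_seeds_alt raw_items
  unfold normalize_owned_avatar_seeds normalize_owned_avatar_seeds_alt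
  exact pvCore _ (PySem.Set.nodup_ofList _)
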